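-- pv_equiv track=rewrite | github.com/labgem/netsyn | syntenyRunner.py | min_max_synteny
-- ===== SOURCE A (Python) =====
-- def min_max_synteny(pos_in_synteny):
--     synteny_description = {}
--     for asynteny in pos_in_synteny:
--         synt_id = asynteny[0]
--         pos_gene_1 = asynteny[1]
--         pos_target_gene_1 = asynteny[2]
--         pos_gene_2 = asynteny[3]
--         pos_target_gene_2 = asynteny[4]
--
--         if not synt_id in synteny_description:
--             synteny_description[synt_id] = {'minG1' : pos_gene_1,
--                                             'maxG1' : pos_gene_1,
--                                             'targetG1' : pos_target_gene_1,
--                                             'minG2' : pos_gene_2,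
--                                             'maxG2' : pos_gene_2,
--                                             'targetG2' : pos_target_gene_2}
--         else:
--             # Genome 1 in synteny
--             if pos_gene_1 < synteny_description[synt_id]['minG1']:
--                 synteny_description[synt_id]['minG1'] = pos_gene_1
--             elif pos_gene_1 > synteny_description[synt_id]['maxG1']:
--                 synteny_description[synt_id]['maxG1'] = pos_gene_1
--             # Genome 2 in synteny
--             if pos_gene_2 < synteny_description[synt_id]['minG2']:
--                 synteny_description[synt_id]['minG2'] = pos_gene_2
--             elif pos_gene_2 > synteny_description[synt_id]['maxG2']:
--                 synteny_description[synt_id]['maxG2'] = pos_gene_2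
--     return synteny_description
-- ===== SOURCE B (Python) =====
-- def _summary(rows):
--     g1 = [r[0] for r in rows]
--     g2 = [r[2] for r in rows]
--     first = rows[0]
--     return {'minG1': min(g1), 'maxG1': max(g1), 'targetG1': first[1],
--             'minG2': min(g2), 'maxG2': max(g2), 'targetG2': first[3]}
--
--
-- def min_max_synteny(pos_in_synteny):
--     groups = {}
--     for synt_id, pos_gene_1, pos_target_gene_1, pos_gene_2, pos_target_gene_2 in pos_in_synteny:
--         groups.setdefault(synt_id, []).append(
--             (pos_gene_1, pos_target_gene_1, pos_gene_2, pos_target_gene_2))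
--     return {synt_id: _summary(rows) for synt_id, rows in groups.items()}
-- ===== Notes on version B (the rewrite author's own statement) =====
-- stated objective: alternative
-- what changed: Replaces A's single-pass streaming min/max updates of a nested dict with a group-then-reduce shape: one pass groups rows per synt_id, a second pass computes min/max with builtin min/max over each group and takes targets from the group's first row.
import Mathlib
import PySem

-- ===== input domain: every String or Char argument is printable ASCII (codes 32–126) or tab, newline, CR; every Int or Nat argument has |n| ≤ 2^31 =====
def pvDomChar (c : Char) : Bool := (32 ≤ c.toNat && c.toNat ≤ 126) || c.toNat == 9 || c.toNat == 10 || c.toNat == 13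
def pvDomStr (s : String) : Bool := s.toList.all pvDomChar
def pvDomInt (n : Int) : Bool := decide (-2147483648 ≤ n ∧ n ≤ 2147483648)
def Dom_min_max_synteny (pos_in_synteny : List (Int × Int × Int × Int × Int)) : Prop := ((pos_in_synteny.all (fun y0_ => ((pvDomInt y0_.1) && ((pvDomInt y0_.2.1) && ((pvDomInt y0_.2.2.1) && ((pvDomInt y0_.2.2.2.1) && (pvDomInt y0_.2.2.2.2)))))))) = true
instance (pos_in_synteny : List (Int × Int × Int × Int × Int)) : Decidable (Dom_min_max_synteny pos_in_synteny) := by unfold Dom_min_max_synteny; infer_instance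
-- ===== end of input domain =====

-- B replaces A's streaming min/max updates with a group-then-reduce decomposition (alternative, same cost).

-- ===== PORT A =====
-- one loop iteration of A: create or update the per-synteny record
def stepA (d : PySem.Dict Int (PySem.Dict String Int)) (asynteny : Int × Int × Int × Int × Int) :
    PySem.Dict Int (PySem.Dict String Int) :=
  let synt_id := asynteny.1
  let pos_gene_1 := asynteny.2.1
  let pos_target_gene_1 := asynteny.2.2.1
  let pos_gene_2 := asynteny.2.2.2.1
  let pos_target_gene_2 := asynteny.2.2.2.2
  match d.get? synt_id with
  | none =>
      d.insert synt_id (PySem.Dict.mk [("minG1", pos_gene_1), ("maxG1", pos_gene_1),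
                                       ("targetG1", pos_target_gene_1), ("minG2", pos_gene_2),
                                       ("maxG2", pos_gene_2), ("targetG2", pos_target_gene_2)])
  | some e =>
      -- Genome 1 in synteny
      let e1 := if pos_gene_1 < e.getD "minG1" 0 then e.insert "minG1" pos_gene_1
                else if pos_gene_1 > e.getD "maxG1" 0 then e.insert "maxG1" pos_gene_1
                else e
      -- Genome 2 in synteny
      let e2 := if pos_gene_2 < e1.getD "minG2" 0 then e1.insert "minG2" pos_gene_2
                else if pos_gene_2 > e1.getD "maxG2" 0 then e1.insert "maxG2" pos_gene_2
                else e1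
      d.insert synt_id e2

def min_max_synteny (pos_in_synteny : List (Int × Int × Int × Int × Int)) : List (Int × List (String × Int)) :=
  ((pos_in_synteny.foldl stepA PySem.Dict.empty).items.map (fun p => (p.1, p.2.items)))

-- ===== PORT B =====
-- Source B's _summary helper (rows is nonempty whenever called; the .getD totalizations are unreachable)
def summaryB (rows : List (Int × Int × Int × Int)) : PySem.Dict String Int :=
  let g1 := rows.map (fun r => r.1)
  let g2 := rows.map (fun r => r.2.2.1)
  let first := (PySem.List.pyGet? rows 0).getD (0, 0, 0, 0)
  PySem.Dict.mk [("minG1", (PySem.List.min? g1 (fun y => y)).getD 0),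
                 ("maxG1", (PySem.List.max? g1 (fun y => y)).getD 0),
                 ("targetG1", first.2.1),
                 ("minG2", (PySem.List.min? g2 (fun y => y)).getD 0),
                 ("maxG2", (PySem.List.max? g2 (fun y => y)).getD 0),
                 ("targetG2", first.2.2.2)]

def min_max_synteny_alt (pos_in_synteny : List (Int × Int × Int × Int × Int)) : List (Int × List (String × Int)) :=
  let groups := pos_in_synteny.foldl
    (fun g r => g.modify r.1 [] (fun rows => rows ++ [(r.2.1, r.2.2.1, r.2.2.2.1, r.2.2.2.2)]))
    PySem.Dict.empty
  let res := groups.items.foldl (fun d p => d.insert p.1 (summaryB p.2)) PySem.Dict.empty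
  res.items.map (fun p => (p.1, p.2.items))

-- ===== PRECONDITION & SPEC =====
def Spec_min_max_synteny (pos_in_synteny : List (Int × Int × Int × Int × Int)) (out : List (Int × List (String × Int))) : Prop := out = min_max_synteny_alt pos_in_synteny
instance (pos_in_synteny : List (Int × Int × Int × Int × Int)) (out : List (Int × List (String × Int))) : Decidable (Spec_min_max_synteny pos_in_synteny out) := by unfold Spec_min_max_synteny; infer_instance

-- ===== CLAIM (what is proved, stated in full; the proofs are below) =====
def Claim_equal_min_max_synteny : Prop := ∀ (pos_in_synteny : List (Int × Int × Int × Int × Int)), Dom_min_max_synteny pos_in_synteny → Spec_min_max_synteny pos_in_synteny (min_max_synteny pos_in_synteny)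

-- ===== LEMMAS AND PROOFS =====

-- the (key, tail) view of a row
def kvRow (r : Int × Int × Int × Int × Int) : Int × (Int × Int × Int × Int) :=
  (r.1, (r.2.1, r.2.2.1, r.2.2.2.1, r.2.2.2.2))

-- the group of a key: tails of the rows carrying it, in order
def grp (k : Int) (xs : List (Int × Int × Int × Int × Int)) : List (Int × Int × Int × Int) :=
  ((xs.map kvRow).filter (fun p => p.1 == k)).map (fun p => p.2)

theorem grp_append_singleton (k : Int) (xs : List (Int × Int × Int × Int × Int)) (r) :
    grp k (xs ++ [r]) = grp k xs ++ (if r.1 = k then [(kvRow r).2] else []) := by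
  simp only [grp, List.map_append, List.filter_append]
  by_cases h : r.1 = k <;> simp [kvRow, h]

theorem grp_eq_nil_iff (k : Int) (xs : List (Int × Int × Int × Int × Int)) :
    grp k xs = [] ↔ k ∉ xs.map (fun r => r.1) := by
  simp [grp, List.filter_eq_nil_iff, kvRow, List.mem_map]
  aesop

theorem summaryB_cons (a : Int × Int × Int × Int) (t : List (Int × Int × Int × Int)) :
    summaryB (a :: t) = PySem.Dict.mk
      [("minG1", (t.map (fun r => r.1)).foldl min a.1),
       ("maxG1", (t.map (fun r => r.1)).foldl max a.1),
       ("targetG1", a.2.1),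
       ("minG2", (t.map (fun r => r.2.2.1)).foldl min a.2.2.1),
       ("maxG2", (t.map (fun r => r.2.2.1)).foldl max a.2.2.1),
       ("targetG2", a.2.2.2)] := by
  simp [summaryB, PySem.List.min?_id_cons, PySem.List.max?_id_cons, PySem.List.pyGet?,
    PySem.List.pyIdx?]

-- the crux: A's conditional update of the record equals B's summary of the extended group
theorem stepA_update (a : Int × Int × Int × Int) (t : List (Int × Int × Int × Int))
    (p1 t1 p2 t2 : Int) :
    (if p2 < (if p1 < (summaryB (a :: t)).getD "minG1" 0 then (summaryB (a :: t)).insert "minG1" p1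
              else if p1 > (summaryB (a :: t)).getD "maxG1" 0 then (summaryB (a :: t)).insert "maxG1" p1
              else summaryB (a :: t)).getD "minG2" 0 then
       (if p1 < (summaryB (a :: t)).getD "minG1" 0 then (summaryB (a :: t)).insert "minG1" p1
        else if p1 > (summaryB (a :: t)).getD "maxG1" 0 then (summaryB (a :: t)).insert "maxG1" p1
        else summaryB (a :: t)).insert "minG2" p2
     else if p2 > (if p1 < (summaryB (a :: t)).getD "minG1" 0 then (summaryB (a :: t)).insert "minG1" p1
              else if p1 > (summaryB (a :: t)).getD "maxG1" 0 then (summaryB (a :: t)).insert "maxG1" p1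
              else summaryB (a :: t)).getD "maxG2" 0 then
       (if p1 < (summaryB (a :: t)).getD "minG1" 0 then (summaryB (a :: t)).insert "minG1" p1
        else if p1 > (summaryB (a :: t)).getD "maxG1" 0 then (summaryB (a :: t)).insert "maxG1" p1
        else summaryB (a :: t)).insert "maxG2" p2
     else (if p1 < (summaryB (a :: t)).getD "minG1" 0 then (summaryB (a :: t)).insert "minG1" p1
           else if p1 > (summaryB (a :: t)).getD "maxG1" 0 then (summaryB (a :: t)).insert "maxG1" p1
           else summaryB (a :: t)))
      = summaryB (a :: (t ++ [(p1, t1, p2, t2)])) := by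
  have h1 := PySem.List.foldl_min_le (t.map (fun r => r.1)) a.1
  have h2 := PySem.List.le_foldl_max (t.map (fun r => r.1)) a.1
  have h3 := PySem.List.foldl_min_le (t.map (fun r => r.2.2.1)) a.2.2.1
  have h4 := PySem.List.le_foldl_max (t.map (fun r => r.2.2.1)) a.2.2.1
  have h5 : a.1 ≤ (t.map (fun r => r.1)).foldl max a.1 := h2.1
  have h6 : (t.map (fun r => r.1)).foldl min a.1 ≤ a.1 := h1.1
  simp only [summaryB_cons, List.map_append, List.foldl_append, List.map_cons, List.map_nil,
    List.foldl_cons, List.foldl_nil]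
  split_ifs with c1 c2 c3 c4 c5 c6 c7 c8 <;>
    simp_all [PySem.Dict.insert, PySem.Dict.contains, PySem.Dict.getD, PySem.Dict.get?] <;>
    omega

-- A's running state, characterised: the record for k is B's summary of k's group so far
theorem A_get? (xs : List (Int × Int × Int × Int × Int)) (k : Int) :
    (xs.foldl stepA PySem.Dict.empty).get? k =
      if grp k xs = [] then none else some (summaryB (grp k xs)) := by
  induction xs using List.reverseRecOn with
  | nil => simp [grp, PySem.Dict.get?, PySem.Dict.empty]
  | append_singleton ys r ih =>
    rw [List.foldl_append, List.foldl_cons, List.foldl_nil, grp_append_singleton]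
    by_cases hk : r.1 = k
    · subst hk
      by_cases hg : grp r.1 ys = []
      · have hD : (ys.foldl stepA PySem.Dict.empty).get? r.1 = none := by rw [ih]; simp [hg]
        simp only [stepA, hD, hg]
        rw [PySem.Dict.get?_insert_self]
        simp [summaryB_cons, kvRow]
      · obtain ⟨a, t, hat⟩ := List.exists_cons_of_ne_nil hg
        have hD : (ys.foldl stepA PySem.Dict.empty).get? r.1 = some (summaryB (grp r.1 ys)) := by
          rw [ih]; simp [hg]
        simp only [stepA, hD]
        rw [PySem.Dict.get?_insert_self]
        rw [if_pos trivial, if_neg (show ¬(grp r.1 ys ++ [(kvRow r).2] = []) by simp),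
          hat, List.cons_append]
        dsimp only [kvRow]
        exact congrArg some (stepA_update a t r.2.1 r.2.2.1 r.2.2.2.1 r.2.2.2.2)
    · have hne : k ≠ r.1 := fun h => hk h.symm
      cases hD : (ys.foldl stepA PySem.Dict.empty).get? r.1 <;>
        simp only [stepA, hD] <;>
        rw [PySem.Dict.get?_insert_of_ne _ _ hne, ih, if_neg hk] <;> simp

-- both branches of stepA store a record at the row's key
def stepV (d : PySem.Dict Int (PySem.Dict String Int)) (r : Int × Int × Int × Int × Int) :
    PySem.Dict String Int :=
  match d.get? r.1 with
  | none => PySem.Dict.mk [("minG1", r.2.1), ("maxG1", r.2.1), ("targetG1", r.2.2.1),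
                           ("minG2", r.2.2.2.1), ("maxG2", r.2.2.2.1), ("targetG2", r.2.2.2.2)]
  | some e =>
      let e1 := if r.2.1 < e.getD "minG1" 0 then e.insert "minG1" r.2.1
                else if r.2.1 > e.getD "maxG1" 0 then e.insert "maxG1" r.2.1 else e
      if r.2.2.2.1 < e1.getD "minG2" 0 then e1.insert "minG2" r.2.2.2.1
      else if r.2.2.2.1 > e1.getD "maxG2" 0 then e1.insert "maxG2" r.2.2.2.1 else e1

theorem stepA_eq : stepA = fun d r => d.insert r.1 (stepV d r) := by
  funext d r
  unfold stepA stepV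
  dsimp only
  cases d.get? r.1 <;> rfl

theorem A_keys (xs : List (Int × Int × Int × Int × Int)) :
    (xs.foldl stepA PySem.Dict.empty).keys = PySem.Set.ofList (xs.map (fun r => r.1)) := by
  rw [stepA_eq, PySem.Dict.keys_foldl_insert_key]
  simp [PySem.Dict.keys, PySem.Dict.empty, PySem.Set.update_nil_left]

theorem A_nodup (xs : List (Int × Int × Int × Int × Int)) :
    (xs.foldl stepA PySem.Dict.empty).keys.Nodup := by
  rw [stepA_eq]
  exact PySem.Dict.nodup_keys_foldl_insert_key _ _ _ _ (by simp [PySem.Dict.keys, PySem.Dict.empty])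

theorem A_items (xs : List (Int × Int × Int × Int × Int)) :
    (xs.foldl stepA PySem.Dict.empty).items =
      (PySem.Set.ofList (xs.map (fun r => r.1))).map (fun k => (k, summaryB (grp k xs))) := by
  rw [PySem.Dict.items_eq_map_keys _ (A_nodup xs) (PySem.Dict.mk []), A_keys]
  refine List.map_congr_left ?_
  intro k hk
  have hg : grp k xs ≠ [] := by
    rw [Ne, grp_eq_nil_iff]
    simpa [PySem.Set.mem_ofList] using hk
  rw [PySem.Dict.getD_eq_get?_getD, A_get?, if_neg hg]
  rfl

-- B's grouping dict, characterised
theorem B_groups_getD (xs : List (Int × Int × Int × Int × Int)) (k : Int) :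
    (xs.foldl (fun g r => g.modify r.1 []
        (fun rows => rows ++ [(r.2.1, r.2.2.1, r.2.2.2.1, r.2.2.2.2)])) PySem.Dict.empty).getD k []
      = grp k xs := by
  have he : (fun (g : PySem.Dict Int (List (Int × Int × Int × Int)))
      (r : Int × Int × Int × Int × Int) => g.modify r.1 []
        (fun rows => rows ++ [(r.2.1, r.2.2.1, r.2.2.2.1, r.2.2.2.2)])) =
      fun g r => (fun (d : PySem.Dict Int (List (Int × Int × Int × Int))) p =>
        d.modify p.1 [] (fun rows => rows ++ [p.2])) g (kvRow r) := rfl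
  rw [he, ← List.foldl_map (f := kvRow)
    (g := fun (d : PySem.Dict Int (List (Int × Int × Int × Int))) p =>
      d.modify p.1 [] (fun rows => rows ++ [p.2])) (l := xs) (init := PySem.Dict.empty),
    PySem.Dict.getD_foldl_modify_append]
  simp [grp, PySem.Dict.getD, PySem.Dict.get?, PySem.Dict.empty]

theorem B_keys (xs : List (Int × Int × Int × Int × Int)) :
    (xs.foldl (fun g r => g.modify r.1 []
        (fun rows => rows ++ [(r.2.1, r.2.2.1, r.2.2.2.1, r.2.2.2.2)])) PySem.Dict.empty).keys
      = PySem.Set.ofList (xs.map (fun r => r.1)) := by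
  rw [PySem.Dict.keys_foldl_modify_key]
  simp [PySem.Dict.keys, PySem.Dict.empty, PySem.Set.update_nil_left]

theorem B_nodup (xs : List (Int × Int × Int × Int × Int)) :
    (xs.foldl (fun g r => g.modify r.1 []
        (fun rows => rows ++ [(r.2.1, r.2.2.1, r.2.2.2.1, r.2.2.2.2)])) PySem.Dict.empty).keys.Nodup := by
  exact PySem.Dict.nodup_keys_foldl_modify_key _ _ _ _ _ (by simp [PySem.Dict.keys, PySem.Dict.empty])

theorem B_groups_items (xs : List (Int × Int × Int × Int × Int)) :
    (xs.foldl (fun g r => g.modify r.1 []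
        (fun rows => rows ++ [(r.2.1, r.2.2.1, r.2.2.2.1, r.2.2.2.2)])) PySem.Dict.empty).items
      = (PySem.Set.ofList (xs.map (fun r => r.1))).map (fun k => (k, grp k xs)) := by
  rw [PySem.Dict.items_eq_map_keys _ (B_nodup xs) [], B_keys]
  refine List.map_congr_left ?_
  intro k _
  rw [B_groups_getD]

-- ===== VERDICT (by name: the statement is the Claim_ definition above) =====
theorem min_max_synteny_spec : Claim_equal_min_max_synteny := by
  intro xs _
  unfold Spec_min_max_synteny min_max_synteny min_max_synteny_alt
  dsimp only
  rw [A_items, B_groups_items]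
  have h := PySem.Dict.items_foldl_insert_fresh
      ((PySem.Set.ofList (xs.map (fun r => r.1))).map (fun k => (k, grp k xs)))
      (fun p => p.1) (fun p => summaryB p.2) PySem.Dict.empty
      (fun a _ => by simp [PySem.Dict.contains, PySem.Dict.empty])
      (by simp [List.map_map, Function.comp_def, PySem.Set.nodup_ofList])
  beta_reduce at h
  rw [h]
  simp [PySem.Dict.empty, List.map_map, Function.comp_def]
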